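-- pv_equiv track=rewrite | github.com/meltjh/ir2_chatbot | models.py | stack_inputs
-- ===== SOURCE A (Python) =====
-- def stack_inputs(input, templates):
--   # Place input at top of list
--   stacked = [] + input
--   mapping = []
--
--   # Place templates for input below
--   index = len(stacked)
--   for batch_templates in templates:
--     stacked += batch_templates
--     mapping.append(list(range(index, index+len(batch_templates))))
--
--     index += len(batch_templates)
--
--   return stacked, mapping
-- ===== SOURCE B (Python) =====
-- def stack_inputs(input, templates):
--     lengths = [len(b) for b in templates]
--     starts = [len(input) + sum(lengths[:i]) for i in range(len(templates))]
--     stacked = [x for b in [input] + templates for x in b]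
--     mapping = [list(range(s, s + l)) for s, l in zip(starts, lengths)]
--     return stacked, mapping
-- ===== Notes on version B (the rewrite author's own statement) =====
-- stated objective: alternative
-- what changed: Replaces A's single interleaved loop carrying (stacked, mapping, index) state with an up-front closed-form start-offset table (len(input) + prefix sums of template lengths), a one-shot flatten comprehension for stacked, and an independent zip comprehension for mapping.
import Mathlib
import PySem

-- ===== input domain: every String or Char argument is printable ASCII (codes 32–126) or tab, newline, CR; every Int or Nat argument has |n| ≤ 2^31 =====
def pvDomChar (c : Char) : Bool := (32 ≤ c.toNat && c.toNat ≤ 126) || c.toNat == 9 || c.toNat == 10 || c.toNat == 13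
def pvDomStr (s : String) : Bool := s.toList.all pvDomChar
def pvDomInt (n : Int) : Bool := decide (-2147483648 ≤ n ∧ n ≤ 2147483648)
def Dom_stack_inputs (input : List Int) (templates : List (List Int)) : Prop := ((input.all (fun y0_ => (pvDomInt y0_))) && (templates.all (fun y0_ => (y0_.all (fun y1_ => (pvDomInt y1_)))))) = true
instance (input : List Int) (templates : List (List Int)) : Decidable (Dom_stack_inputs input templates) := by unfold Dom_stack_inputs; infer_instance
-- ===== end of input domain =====

-- ===== PORT A =====
-- B restates A's interleaved accumulator loop as closed-form start offsets + independent flatten/zip passes (objective: alternative decomposition).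
-- literal port of A's for-loop over templates carrying (stacked, mapping, index)
def stackLoopA : List (List Int) → List Int × List (List Int) × Int → List Int × List (List Int)
  | [], (stacked, mapping, _) => (stacked, mapping)
  | bt :: rest, (stacked, mapping, index) =>
      stackLoopA rest (stacked ++ bt,
        mapping ++ [PySem.List.pyRange index (index + (bt.length : Int)) 1],
        index + (bt.length : Int))

def stack_inputs (input : List Int) (templates : List (List Int)) : List Int × List (List Int) :=
  let stacked : List Int := [] ++ input
  let mapping : List (List Int) := []
  let index : Int := (stacked.length : Int)
  stackLoopA templates (stacked, mapping, index)

-- ===== PORT B =====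
def stack_inputs_alt (input : List Int) (templates : List (List Int)) : List Int × List (List Int) :=
  let lengths : List Int := templates.map (fun b => (b.length : Int))
  let starts : List Int := (List.range templates.length).map
    (fun i => (input.length : Int) + (lengths.take i).sum)
  let stacked : List Int := (input :: templates).flatMap (fun b => b)
  let mapping : List (List Int) := (starts.zip lengths).map
    (fun p => PySem.List.pyRange p.1 (p.1 + p.2) 1)
  (stacked, mapping)

-- ===== PRECONDITION & SPEC =====
def Spec_stack_inputs (input : List Int) (templates : List (List Int)) (out : List Int × List (List Int)) : Prop := out = stack_inputs_alt input templates
instance (input : List Int) (templates : List (List Int)) (out : List Int × List (List Int)) : Decidable (Spec_stack_inputs input templates out) := by unfold Spec_stack_inputs; infer_instance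

-- ===== CLAIM =====
def Claim_equal_stack_inputs : Prop := ∀ (input : List Int) (templates : List (List Int)), Dom_stack_inputs input templates → Spec_stack_inputs input templates (stack_inputs input templates)

-- ===== LEMMAS AND PROOFS =====
-- the mapping A's loop builds, as a structural recursion
def mapB : List (List Int) → Int → List (List Int)
  | [], _ => []
  | bt :: rest, idx =>
      PySem.List.pyRange idx (idx + (bt.length : Int)) 1 :: mapB rest (idx + (bt.length : Int))

theorem stackLoopA_eq (ts : List (List Int)) :
    ∀ (stacked : List Int) (mapping : List (List Int)) (idx : Int),
      stackLoopA ts (stacked, mapping, idx)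
        = (stacked ++ ts.flatMap (fun b => b), mapping ++ mapB ts idx) := by
  induction ts with
  | nil => intro stacked mapping idx; simp [stackLoopA, mapB]
  | cons bt rest ih =>
      intro stacked mapping idx
      simp [stackLoopA, mapB, ih]

theorem mapping_alt_eq (ts : List (List Int)) :
    ∀ (idx : Int),
      ((((List.range ts.length).map
          (fun i => idx + ((ts.map (fun b => (b.length : Int))).take i).sum)).zip
        (ts.map (fun b => (b.length : Int)))).map
        (fun p => PySem.List.pyRange p.1 (p.1 + p.2) 1)) = mapB ts idx := by
  induction ts with
  | nil => intro idx; simp [mapB]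
  | cons bt rest ih =>
      intro idx
      rw [List.length_cons, List.range_succ_eq_map]
      simp only [List.map_cons, List.map_map, List.take_zero, List.sum_nil,
        List.zip_cons_cons, List.map_cons, mapB, List.cons.injEq]
      refine ⟨by simp, ?_⟩
      rw [← ih (idx + (bt.length : Int))]
      congr 1
      congr 1
      apply List.map_congr_left
      intro i _
      simp [Function.comp, List.take_succ_cons]
      ring

-- ===== VERDICT =====
theorem stack_inputs_spec : Claim_equal_stack_inputs := by
  intro input templates _
  unfold Spec_stack_inputs stack_inputs stack_inputs_alt
  simp only []
  rw [stackLoopA_eq]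
  refine Prod.ext ?_ ?_
  · simp
  · simpa using (mapping_alt_eq templates (input.length : Int)).symm
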